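-- pv_equiv track=rewrite | github.com/justinpombrio/AdventOfCode | 2023/day18/day18_original.py | area_of_path
-- ===== SOURCE A (Python) =====
-- def area_of_path(path):
--     area = 0
--     left_right = 0
--     for direction in path:
--         if direction == "R":
--             left_right += 1
--         elif direction == "L":
--             left_right -= 1
--         elif direction == "U":
--             area += left_right
--         elif direction == "D":
--             area -= left_right
--     return abs(area)
-- ===== SOURCE B (Python) =====
-- def area_of_path(path):
--     # Pass 1: materialize the vertex list of the walk starting at (0, 0).
--     pts = [(0, 0)]
--     x = y = 0
--     for d in path:
--         if d == "R":
--             x += 1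
--         elif d == "L":
--             x -= 1
--         elif d == "U":
--             y += 1
--         elif d == "D":
--             y -= 1
--         pts.append((x, y))
--     # Pass 2: line integral of x dy over consecutive vertices.
--     s = 0
--     for (x0, y0), (x1, y1) in zip(pts, pts[1:]):
--         s += x0 * (y1 - y0)
--     return abs(s)
-- ===== Notes on version B (the rewrite author's own statement) =====
-- stated objective: alternative
-- what changed: B replaces A's single accumulator loop by two passes: it first materializes the list of (x,y) vertices of the walk, then sums the line integral x*dy over consecutive vertex pairs and takes abs.
import Mathlib
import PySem

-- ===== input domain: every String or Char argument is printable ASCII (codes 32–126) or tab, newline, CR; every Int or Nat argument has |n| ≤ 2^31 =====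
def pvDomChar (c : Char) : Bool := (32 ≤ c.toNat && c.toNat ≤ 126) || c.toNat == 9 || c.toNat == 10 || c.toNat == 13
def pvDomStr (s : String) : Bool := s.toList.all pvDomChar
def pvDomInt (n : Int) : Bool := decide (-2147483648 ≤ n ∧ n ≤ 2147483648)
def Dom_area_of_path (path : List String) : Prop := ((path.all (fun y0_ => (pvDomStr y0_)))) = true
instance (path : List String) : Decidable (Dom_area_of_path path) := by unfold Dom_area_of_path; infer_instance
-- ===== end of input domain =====

-- B is an alternative decomposition: materialize the walk's vertices, then sum the line integral x*dy; return value proved equal to A's.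

-- ===== PORT A =====
-- state = (area, left_right)
def area_of_path (path : List String) : Int :=
  let st := path.foldl (fun (p : Int × Int) direction =>
    if direction = "R" then (p.1, p.2 + 1)
    else if direction = "L" then (p.1, p.2 - 1)
    else if direction = "U" then (p.1 + p.2, p.2)
    else if direction = "D" then (p.1 - p.2, p.2)
    else p) (0, 0)
  |st.1|

-- ===== PORT B =====
-- pass 1: vertices of the walk after each step, starting from (x, y)
def pvStep (d : String) (x y : Int) : Int × Int :=
  if d = "R" then (x + 1, y)
  else if d = "L" then (x - 1, y)
  else if d = "U" then (x, y + 1)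
  else if d = "D" then (x, y - 1)
  else (x, y)

def pvPoints : List String → Int → Int → List (Int × Int)
  | [], _, _ => []
  | d :: rest, x, y =>
    let p := pvStep d x y
    p :: pvPoints rest p.1 p.2

-- pass 2: sum of x0 * (y1 - y0) over consecutive vertex pairs
def pvLineInt : List (Int × Int) → Int
  | p0 :: p1 :: rest => p0.1 * (p1.2 - p0.2) + pvLineInt (p1 :: rest)
  | _ => 0

def area_of_path_alt (path : List String) : Int :=
  |pvLineInt ((0, 0) :: pvPoints path 0 0)|

-- ===== PRECONDITION & SPEC =====
def Spec_area_of_path (path : List String) (out : Int) : Prop := out = area_of_path_alt path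
instance (path : List String) (out : Int) : Decidable (Spec_area_of_path path out) := by unfold Spec_area_of_path; infer_instance

-- ===== CLAIM (what is proved, stated in full; the proofs are below) =====
def Claim_equal_area_of_path : Prop := ∀ (path : List String), Dom_area_of_path path → Spec_area_of_path path (area_of_path path)

-- ===== LEMMAS AND PROOFS =====
theorem pvKey (path : List String) : ∀ (a x y : Int),
    a + pvLineInt ((x, y) :: pvPoints path x y)
      = (path.foldl (fun (p : Int × Int) direction =>
          if direction = "R" then (p.1, p.2 + 1)
          else if direction = "L" then (p.1, p.2 - 1)
          else if direction = "U" then (p.1 + p.2, p.2)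
          else if direction = "D" then (p.1 - p.2, p.2)
          else p) (a, x)).1 := by
  induction path with
  | nil => intro a x y; simp [pvPoints, pvLineInt]
  | cons d rest ih =>
    intro a x y
    simp only [pvPoints, pvLineInt, List.foldl_cons, pvStep]
    split_ifs <;> simp only [] <;>
      [ (have := ih a (x + 1) y);
        (have := ih a (x - 1) y);
        (have := ih (a + x) x (y + 1));
        (have := ih (a - x) x (y - 1));
        (have := ih a x y) ] <;>
      rw [← this] <;> ring

theorem area_of_path_spec : Claim_equal_area_of_path := by
  intro path _
  show area_of_path path = area_of_path_alt path
  have h := pvKey path 0 0 0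
  rw [zero_add] at h
  show |(path.foldl (fun (p : Int × Int) direction =>
          if direction = "R" then (p.1, p.2 + 1)
          else if direction = "L" then (p.1, p.2 - 1)
          else if direction = "U" then (p.1 + p.2, p.2)
          else if direction = "D" then (p.1 - p.2, p.2)
          else p) (0, 0)).1| = area_of_path_alt path
  rw [← h]
  rfl

-- ===== VERDICT (by name: the statement is the Claim_ definition above) =====
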